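-- pv_equiv track=rewrite | github.com/stanford-crfm/helm | src/service.py | expand_environments
-- ===== SOURCE A (Python) =====
-- from typing import Dict, List, Tuple, Any
--
-- MAX_EXPANSION = 1000
--
-- def expand_environments(environments: Dict[str, List[str]]):
--     """
--     `environments` is a map from variable names to a list of strings.
--     Return: a list of environments, where for each variable, we choose one of its string.
--     """
--     output_environments: List[Dict[str, str]] = []
--
--     def recurse(old_items: List[Tuple[str, List[str]]], new_items: List[Tuple[str, str]]):
--         if len(output_environments) >= MAX_EXPANSION:
--             return
--         if len(old_items) == 0:
--             output_environments.append(dict(new_items))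
--         else:
--             item, rest_old_items = old_items[0], old_items[1:]
--             key, list_value = item
--             for elem_value in list_value:
--                 recurse(rest_old_items, new_items + [(key, elem_value)])
--
--     recurse(list(environments.items()), [])
--     return output_environments
-- ===== SOURCE B (Python) =====
-- import itertools
--
-- MAX_EXPANSION = 1000
--
--
-- def expand_environments(environments):
--     keys = tuple(environments.keys())
--     value_lists = tuple(environments.values())
--     return [dict(zip(keys, combo))
--             for combo in itertools.islice(itertools.product(*value_lists), MAX_EXPANSION)]
-- ===== Notes on version B (the rewrite author's own statement) =====
-- stated objective: idiomatic
-- what changed: Replaces the hand-written capped depth-first recursion (with a shared mutable accumulator) by a flat loop over itertools.product with itertools.islice for the cap, zipping each combination back onto the keys.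
import Mathlib
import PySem

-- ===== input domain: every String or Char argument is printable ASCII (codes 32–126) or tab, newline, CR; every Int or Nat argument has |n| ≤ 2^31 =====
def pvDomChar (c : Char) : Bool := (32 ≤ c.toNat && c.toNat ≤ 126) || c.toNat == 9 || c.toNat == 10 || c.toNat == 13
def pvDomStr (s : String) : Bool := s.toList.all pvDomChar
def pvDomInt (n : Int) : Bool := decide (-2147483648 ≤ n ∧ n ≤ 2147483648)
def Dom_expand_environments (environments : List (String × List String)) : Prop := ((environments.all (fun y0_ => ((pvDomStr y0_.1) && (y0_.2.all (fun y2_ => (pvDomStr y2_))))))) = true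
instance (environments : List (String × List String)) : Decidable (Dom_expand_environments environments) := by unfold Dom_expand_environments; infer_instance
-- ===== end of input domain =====

-- B replaces A's capped depth-first recursion with a mutable accumulator by a flat loop over
-- itertools.product truncated with islice (idiomatic; same output, same cost).

-- ===== PORT A =====
-- the inner closure `recurse`; `out` plays the role of the mutable output_environments list
def pvRecurseA : List (String × List String) → List (String × String) →
    List (List (String × String)) → List (List (String × String))
  | oldItems, newItems, out =>
    if out.length ≥ 1000 then out
    else
      match oldItems with
      | [] => out ++ [(PySem.Dict.ofList newItems).items]
      | (key, listValue) :: rest =>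
          listValue.foldl (fun acc v => pvRecurseA rest (newItems ++ [(key, v)]) acc) out
  termination_by oldItems _ _ => oldItems.length
  decreasing_by simp_all

def expand_environments (environments : List (String × List String)) : List (List (String × String)) :=
  pvRecurseA environments [] []

-- ===== PORT B =====
-- itertools.product(*value_lists) as a list (evaluated eagerly; islice = take)
def pvProduct : List (List String) → List (List String)
  | [] => [[]]
  | l :: ls => l.flatMap (fun v => (pvProduct ls).map (fun t => v :: t))

def expand_environments_alt (environments : List (String × List String)) : List (List (String × String)) :=
  let keys := environments.map (·.1)
  let valueLists := environments.map (·.2)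
  ((pvProduct valueLists).take 1000).map (fun combo => (PySem.Dict.ofList (keys.zip combo)).items)

-- ===== PRECONDITION & SPEC =====
def Spec_expand_environments (environments : List (String × List String)) (out : List (List (String × String))) : Prop := out = expand_environments_alt environments
instance (environments : List (String × List String)) (out : List (List (String × String))) : Decidable (Spec_expand_environments environments out) := by unfold Spec_expand_environments; infer_instance

-- ===== CLAIM (what is proved, stated in full; the proofs are below) =====
def Claim_equal_expand_environments : Prop := ∀ (environments : List (String × List String)), Dom_expand_environments environments → Spec_expand_environments environments (expand_environments environments)

-- ===== LEMMAS AND PROOFS =====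

-- what A's recursion appends: all completions of `newItems` over `oldItems`, in product order
def pvResults (oldItems : List (String × List String)) (newItems : List (String × String)) :
    List (List (String × String)) :=
  (pvProduct (oldItems.map (·.2))).map
    (fun t => (PySem.Dict.ofList (newItems ++ (oldItems.map (·.1)).zip t)).items)

theorem pvTake_append_chain {α : Type} (A B : List α) (n : Nat) :
    (A ++ B).take n = A.take n ++ B.take (n - (A.take n).length) := by
  rw [List.take_append]
  congr 1
  · congr 1; simp [List.length_take]; omega

theorem pvResults_cons (k : String) (lv : List String) (rest : List (String × List String))
    (newItems : List (String × String)) :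
    pvResults ((k, lv) :: rest) newItems
      = lv.flatMap (fun v => pvResults rest (newItems ++ [(k, v)])) := by
  simp [pvResults, pvProduct, List.map_flatMap, List.map_map, Function.comp_def,
    List.append_assoc]

theorem pvRecurseA_eq (oldItems : List (String × List String)) :
    ∀ (newItems : List (String × String)) (out : List (List (String × String))),
      pvRecurseA oldItems newItems out
        = out ++ (pvResults oldItems newItems).take (1000 - out.length) := by
  induction oldItems with
  | nil =>
      intro newItems out
      rw [pvRecurseA.eq_def]
      simp only [pvResults, pvProduct, List.map_nil, List.zip_nil_left, List.append_nil,
        List.map_cons, List.map_nil]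
      by_cases h : out.length ≥ 1000
      · simp [h, Nat.sub_eq_zero_of_le h]
      · simp [h]; omega
  | cons hd rest ih =>
      obtain ⟨k, lv⟩ := hd
      intro newItems out
      rw [pvRecurseA.eq_def]
      by_cases h : out.length ≥ 1000
      · simp [h, Nat.sub_eq_zero_of_le h]
      · simp only [h] at *
        rw [if_neg (by omega), pvResults_cons]
        -- inner induction over the values of the first variable
        clear h
        induction lv generalizing out with
        | nil => simp
        | cons v lv' ihv =>
            simp only [List.foldl_cons, List.flatMap_cons]
            rw [ih, ihv, pvTake_append_chain]
            rw [List.append_assoc]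
            congr 2
            congr 1
            simp [List.length_take]
            omega

-- ===== VERDICT (by name: the statement is the Claim_ definition above) =====
theorem expand_environments_spec : Claim_equal_expand_environments := by
  intro environments _
  unfold Spec_expand_environments expand_environments expand_environments_alt
  rw [pvRecurseA_eq]
  simp [pvResults, List.map_take]
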